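-- pv_equiv track=rewrite | github.com/Kirill-Z/Diplom | calc_error.py | separation_data_by_lead_time
-- ===== SOURCE A (Python) =====
-- def separation_data_by_lead_time(data):
--     lead_time_0 = []
--     lead_time_3 = []
--     lead_time_6 = []
--     lead_time_9 = []
--     lead_time_12 = []
--     lead_time_15 = []
--     lead_time_18 = []
--     lead_time_21 = []
--     lead_time_24 = []
--     lead_time_27 = []
--     lead_time_30 = []
--     lead_time_33 = []
--     lead_time_36 = []
--     lead_time_39 = []
--     lead_time_42 = []
--     lead_time_45 = []
--     lead_time_48 = []
--     lead_time_51 = []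
--     lead_time_54 = []
--     lead_time_57 = []
--     lead_time_60 = []
--     lead_time_63 = []
--     lead_time_66 = []
--     lead_time_69 = []
--     lead_time_72 = []
--     lead_time_75 = []
--     lead_time_78 = []
--     for i in range(0, len(data)):
--         lead_time = data[i][0][11:13]
--         if lead_time == '00':
--             lead_time_0.append(data[i])
--         if lead_time == '03':
--             lead_time_3.append(data[i])
--         if lead_time == '06':
--             lead_time_6.append(data[i])
--         if lead_time == '09':
--             lead_time_9.append(data[i])
--         if lead_time == '12':
--             lead_time_12.append(data[i])
--         if lead_time == '15':
--             lead_time_15.append(data[i])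
--         if lead_time == '18':
--             lead_time_18.append(data[i])
--         if lead_time == '21':
--             lead_time_21.append(data[i])
--         if lead_time == '24':
--             lead_time_24.append(data[i])
--         if lead_time == '27':
--             lead_time_27.append(data[i])
--         if lead_time == '30':
--             lead_time_30.append(data[i])
--         if lead_time == '33':
--             lead_time_33.append(data[i])
--         if lead_time == '36':
--             lead_time_36.append(data[i])
--         if lead_time == '39':
--             lead_time_39.append(data[i])
--         if lead_time == '42':
--             lead_time_42.append(data[i])
--         if lead_time == '45':
--             lead_time_45.append(data[i])
--         if lead_time == '48':
--             lead_time_48.append(data[i])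
--         if lead_time == '51':
--             lead_time_51.append(data[i])
--         if lead_time == '54':
--             lead_time_54.append(data[i])
--         if lead_time == '57':
--             lead_time_57.append(data[i])
--         if lead_time == '60':
--             lead_time_60.append(data[i])
--         if lead_time == '63':
--             lead_time_63.append(data[i])
--         if lead_time == '66':
--             lead_time_66.append(data[i])
--         if lead_time == '69':
--             lead_time_69.append(data[i])
--         if lead_time == '72':
--             lead_time_72.append(data[i])
--         if lead_time == '75':
--             lead_time_75.append(data[i])
--         if lead_time == '78':
--             lead_time_78.append(data[i])
--
--     return lead_time_0, lead_time_3, lead_time_6, lead_time_9, lead_time_12, lead_time_15, lead_time_18, lead_time_21, \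
--            lead_time_24, lead_time_27, lead_time_30, lead_time_33, lead_time_36, lead_time_39, lead_time_42, \
--            lead_time_45, lead_time_48, lead_time_51, lead_time_54, lead_time_57, lead_time_60, lead_time_63, \
--            lead_time_66, lead_time_69, lead_time_72, lead_time_75, lead_time_78
-- ===== SOURCE B (Python) =====
-- LEAD_TIME_KEYS = ['00', '03', '06', '09', '12', '15', '18', '21', '24', '27',
--                   '30', '33', '36', '39', '42', '45', '48', '51', '54', '57',
--                   '60', '63', '66', '69', '72', '75', '78']
--
--
-- def separation_data_by_lead_time(data):
--     return tuple([row for row in data if row[0][11:13] == key]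
--                  for key in LEAD_TIME_KEYS)
-- ===== Notes on version B (the rewrite author's own statement) =====
-- stated objective: simpler
-- what changed: Replaces the single loop over the data with a 27-branch if-chain into 27 named accumulators by one filtering comprehension per key over a fixed ordered key list, collected with tuple(...).
import Mathlib
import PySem

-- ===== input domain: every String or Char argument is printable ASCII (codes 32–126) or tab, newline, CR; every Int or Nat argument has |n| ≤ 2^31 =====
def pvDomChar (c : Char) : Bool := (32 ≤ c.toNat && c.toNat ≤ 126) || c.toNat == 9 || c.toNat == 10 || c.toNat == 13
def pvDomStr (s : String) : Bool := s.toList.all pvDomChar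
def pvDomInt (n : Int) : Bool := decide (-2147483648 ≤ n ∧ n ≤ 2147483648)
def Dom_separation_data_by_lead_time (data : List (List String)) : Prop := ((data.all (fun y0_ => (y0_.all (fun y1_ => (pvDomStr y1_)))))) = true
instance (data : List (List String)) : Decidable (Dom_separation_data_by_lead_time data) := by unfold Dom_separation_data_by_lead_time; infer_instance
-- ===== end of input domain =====

-- B replaces A's single loop with a 27-branch if-chain by one filtering pass per key over a
-- fixed ordered key list (objective: simpler). Return value only; neither program mutates its argument.

-- ===== PORT A =====
-- data[i][0][11:13]: row[0] (IndexError on an empty row is excluded by Pre_, guarded here by ""),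
-- then the slice [11:13]; exact via PySem.List.pyGet? / PySem.List.slice on the char list.
def pvLeadOf (row : List String) : String :=
  match PySem.List.pyGet? row 0 with
  | some s => String.mk (PySem.List.slice s.toList (some 11) (some 13))
  | none => ""

structure PvBuckets where
  b0 : List (List String)
  b1 : List (List String)
  b2 : List (List String)
  b3 : List (List String)
  b4 : List (List String)
  b5 : List (List String)
  b6 : List (List String)
  b7 : List (List String)
  b8 : List (List String)
  b9 : List (List String)
  b10 : List (List String)
  b11 : List (List String)
  b12 : List (List String)
  b13 : List (List String)
  b14 : List (List String)
  b15 : List (List String)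
  b16 : List (List String)
  b17 : List (List String)
  b18 : List (List String)
  b19 : List (List String)
  b20 : List (List String)
  b21 : List (List String)
  b22 : List (List String)
  b23 : List (List String)
  b24 : List (List String)
  b25 : List (List String)
  b26 : List (List String)

def pvStepA (acc : PvBuckets) (row : List String) : PvBuckets :=
  let lt := pvLeadOf row
  {
    b0 := if lt == "00" then acc.b0 ++ [row] else acc.b0,
    b1 := if lt == "03" then acc.b1 ++ [row] else acc.b1,
    b2 := if lt == "06" then acc.b2 ++ [row] else acc.b2,
    b3 := if lt == "09" then acc.b3 ++ [row] else acc.b3,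
    b4 := if lt == "12" then acc.b4 ++ [row] else acc.b4,
    b5 := if lt == "15" then acc.b5 ++ [row] else acc.b5,
    b6 := if lt == "18" then acc.b6 ++ [row] else acc.b6,
    b7 := if lt == "21" then acc.b7 ++ [row] else acc.b7,
    b8 := if lt == "24" then acc.b8 ++ [row] else acc.b8,
    b9 := if lt == "27" then acc.b9 ++ [row] else acc.b9,
    b10 := if lt == "30" then acc.b10 ++ [row] else acc.b10,
    b11 := if lt == "33" then acc.b11 ++ [row] else acc.b11,
    b12 := if lt == "36" then acc.b12 ++ [row] else acc.b12,
    b13 := if lt == "39" then acc.b13 ++ [row] else acc.b13,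
    b14 := if lt == "42" then acc.b14 ++ [row] else acc.b14,
    b15 := if lt == "45" then acc.b15 ++ [row] else acc.b15,
    b16 := if lt == "48" then acc.b16 ++ [row] else acc.b16,
    b17 := if lt == "51" then acc.b17 ++ [row] else acc.b17,
    b18 := if lt == "54" then acc.b18 ++ [row] else acc.b18,
    b19 := if lt == "57" then acc.b19 ++ [row] else acc.b19,
    b20 := if lt == "60" then acc.b20 ++ [row] else acc.b20,
    b21 := if lt == "63" then acc.b21 ++ [row] else acc.b21,
    b22 := if lt == "66" then acc.b22 ++ [row] else acc.b22,
    b23 := if lt == "69" then acc.b23 ++ [row] else acc.b23,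
    b24 := if lt == "72" then acc.b24 ++ [row] else acc.b24,
    b25 := if lt == "75" then acc.b25 ++ [row] else acc.b25,
    b26 := if lt == "78" then acc.b26 ++ [row] else acc.b26
  }

def separation_data_by_lead_time (data : List (List String)) : List (List (List String)) :=
  let r := data.foldl pvStepA ⟨[], [], [], [], [], [], [], [], [], [], [], [], [], [], [], [], [], [], [], [], [], [], [], [], [], [], []⟩
  [r.b0, r.b1, r.b2, r.b3, r.b4, r.b5, r.b6, r.b7, r.b8, r.b9, r.b10, r.b11, r.b12, r.b13, r.b14, r.b15, r.b16, r.b17, r.b18, r.b19, r.b20, r.b21, r.b22, r.b23, r.b24, r.b25, r.b26]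

-- ===== PORT B =====
def pvKeys : List String :=
  ["00", "03", "06", "09", "12", "15", "18", "21", "24", "27", "30", "33", "36",
   "39", "42", "45", "48", "51", "54", "57", "60", "63", "66", "69", "72", "75", "78"]

def separation_data_by_lead_time_alt (data : List (List String)) : List (List (List String)) :=
  pvKeys.map (fun key => data.filter (fun row => pvLeadOf row == key))

-- ===== PRECONDITION & SPEC =====
-- Pre_ excludes inputs containing an empty row, on which both Pythons raise IndexError at row[0].
def Pre_separation_data_by_lead_time (data : List (List String)) : Prop :=
  ∀ row ∈ data, row ≠ []
instance (data : List (List String)) : Decidable (Pre_separation_data_by_lead_time data) := by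
  unfold Pre_separation_data_by_lead_time; infer_instance

def pvWitness_separation_data_by_lead_time : List (List String) :=
  [["2020-01-01 00:00", "a"], ["2020-01-01 03:00"], ["short"]]

def Spec_separation_data_by_lead_time (data : List (List String)) (out : List (List (List String))) : Prop := out = separation_data_by_lead_time_alt data
instance (data : List (List String)) (out : List (List (List String))) : Decidable (Spec_separation_data_by_lead_time data out) := by unfold Spec_separation_data_by_lead_time; infer_instance

-- ===== CLAIM (what is proved, stated in full; the proofs are below) =====
def Claim_equal_separation_data_by_lead_time : Prop := ∀ (data : List (List String)), Dom_separation_data_by_lead_time data → Pre_separation_data_by_lead_time data → Spec_separation_data_by_lead_time data (separation_data_by_lead_time data)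

-- ===== LEMMAS AND PROOFS =====

lemma pvFilterStep (k : String) (a : List (List String)) (row : List String)
    (rest : List (List String)) :
    (if pvLeadOf row == k then a ++ [row] else a) ++ rest.filter (fun r => pvLeadOf r == k) =
      a ++ (row :: rest).filter (fun r => pvLeadOf r == k) := by
  by_cases h : pvLeadOf row == k <;> simp [List.filter_cons, h]

lemma pvFoldA_eq (data : List (List String)) :
    ∀ acc : PvBuckets, data.foldl pvStepA acc =
      ⟨acc.b0 ++ data.filter (fun r => pvLeadOf r == "00"),
    acc.b1 ++ data.filter (fun r => pvLeadOf r == "03"),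
    acc.b2 ++ data.filter (fun r => pvLeadOf r == "06"),
    acc.b3 ++ data.filter (fun r => pvLeadOf r == "09"),
    acc.b4 ++ data.filter (fun r => pvLeadOf r == "12"),
    acc.b5 ++ data.filter (fun r => pvLeadOf r == "15"),
    acc.b6 ++ data.filter (fun r => pvLeadOf r == "18"),
    acc.b7 ++ data.filter (fun r => pvLeadOf r == "21"),
    acc.b8 ++ data.filter (fun r => pvLeadOf r == "24"),
    acc.b9 ++ data.filter (fun r => pvLeadOf r == "27"),
    acc.b10 ++ data.filter (fun r => pvLeadOf r == "30"),
    acc.b11 ++ data.filter (fun r => pvLeadOf r == "33"),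
    acc.b12 ++ data.filter (fun r => pvLeadOf r == "36"),
    acc.b13 ++ data.filter (fun r => pvLeadOf r == "39"),
    acc.b14 ++ data.filter (fun r => pvLeadOf r == "42"),
    acc.b15 ++ data.filter (fun r => pvLeadOf r == "45"),
    acc.b16 ++ data.filter (fun r => pvLeadOf r == "48"),
    acc.b17 ++ data.filter (fun r => pvLeadOf r == "51"),
    acc.b18 ++ data.filter (fun r => pvLeadOf r == "54"),
    acc.b19 ++ data.filter (fun r => pvLeadOf r == "57"),
    acc.b20 ++ data.filter (fun r => pvLeadOf r == "60"),
    acc.b21 ++ data.filter (fun r => pvLeadOf r == "63"),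
    acc.b22 ++ data.filter (fun r => pvLeadOf r == "66"),
    acc.b23 ++ data.filter (fun r => pvLeadOf r == "69"),
    acc.b24 ++ data.filter (fun r => pvLeadOf r == "72"),
    acc.b25 ++ data.filter (fun r => pvLeadOf r == "75"),
    acc.b26 ++ data.filter (fun r => pvLeadOf r == "78")⟩ := by
  induction data with
  | nil => intro acc; simp
  | cons row rest ih =>
      intro acc
      rw [List.foldl_cons, ih]
      simp only [pvStepA, PvBuckets.mk.injEq]
      refine ⟨?_, ?_, ?_, ?_, ?_, ?_, ?_, ?_, ?_, ?_, ?_, ?_, ?_, ?_, ?_, ?_, ?_, ?_, ?_, ?_, ?_, ?_, ?_, ?_, ?_, ?_, ?_⟩ <;> exact pvFilterStep _ _ row rest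

-- ===== VERDICT (by name: the statement is the Claim_ definition above) =====
theorem separation_data_by_lead_time_spec : Claim_equal_separation_data_by_lead_time := by
  intro data _ _
  show separation_data_by_lead_time data = separation_data_by_lead_time_alt data
  rw [separation_data_by_lead_time, pvFoldA_eq]
  simp [separation_data_by_lead_time_alt, pvKeys]
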